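-- pv_equiv track=rewrite | github.com/piotrsniady/python-exercises-pynative | python_strings.py | arrange_string
-- ===== SOURCE A (Python) =====
-- def arrange_string(string: str) -> str:
--     lower_chars = []
--     upper_chars = []
--
--     for char in string:
--         if char.islower():
--             lower_chars.append(char)
--         else:
--             upper_chars.append(char)
--     return "".join(sorted(lower_chars, reverse=False)) + "".join(sorted(upper_chars, reverse=False))
-- ===== SOURCE B (Python) =====
-- def arrange_string(string: str) -> str:
--     # one stable sort with a composite key: lowercase chars (group offset 0)
--     # come before everything else (group offset 0x110000), each group ordered by code point
--     return "".join(sorted(string, key=lambda c: ord(c) + (0 if c.islower() else 0x110000)))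
-- ===== Notes on version B (the rewrite author's own statement) =====
-- stated objective: simpler
-- what changed: Replaced the explicit two-list partition loop followed by two separate sorts with a single sorted() call over the whole string using a composite integer key (group offset + code point).
import Mathlib
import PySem

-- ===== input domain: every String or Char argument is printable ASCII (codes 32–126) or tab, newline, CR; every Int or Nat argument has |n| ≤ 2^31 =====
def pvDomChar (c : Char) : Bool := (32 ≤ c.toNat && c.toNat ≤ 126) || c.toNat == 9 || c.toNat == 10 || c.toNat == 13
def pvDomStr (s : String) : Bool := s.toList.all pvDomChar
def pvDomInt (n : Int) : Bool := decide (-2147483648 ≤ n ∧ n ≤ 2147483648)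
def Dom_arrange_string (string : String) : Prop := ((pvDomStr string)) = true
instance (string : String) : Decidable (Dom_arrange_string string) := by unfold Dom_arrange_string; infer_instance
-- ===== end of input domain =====

-- B replaces A's two-list partition loop plus two sorts by one stable sort with a
-- composite integer key (group offset + code point); objective: simpler.


-- ===== PORT A =====
def arrange_string (string : String) : String :=
  let p := string.toList.foldl
    (fun (acc : List Char × List Char) char =>
      if PySem.Chars.islower char then (acc.1 ++ [char], acc.2) else (acc.1, acc.2 ++ [char]))
    ([], [])
  String.ofList (PySem.List.sorted p.1 (fun c => c) false) ++
    String.ofList (PySem.List.sorted p.2 (fun c => c) false)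

-- ===== PORT B =====
-- key = ord(c) + (0 if c.islower() else 0x110000)
def pvKey (c : Char) : Int :=
  (c.toNat : Int) + (if PySem.Chars.islower c then 0 else 0x110000)

def arrange_string_alt (string : String) : String :=
  String.ofList (PySem.List.sorted string.toList pvKey false)

-- ===== PRECONDITION & SPEC =====
def Spec_arrange_string (string : String) (out : String) : Prop := out = arrange_string_alt string
instance (string : String) (out : String) : Decidable (Spec_arrange_string string out) := by unfold Spec_arrange_string; infer_instance

-- ===== CLAIM (what is proved, stated in full; the proofs are below) =====
def Claim_equal_arrange_string : Prop := ∀ (string : String), Dom_arrange_string string → Spec_arrange_string string (arrange_string string)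

-- ===== LEMMAS AND PROOFS =====

theorem pv_toNat_lt (c : Char) : c.toNat < 0x110000 := by
  have h := c.valid
  unfold UInt32.isValidChar Nat.isValidChar at h
  have : c.toNat = c.val.toNat := rfl
  omega

theorem pvKey_inj : Function.Injective pvKey := by
  intro c d h
  unfold pvKey at h
  have hc := pv_toNat_lt c
  have hd := pv_toNat_lt d
  have hcd : c.toNat = d.toNat := by
    by_cases h1 : PySem.Chars.islower c <;> by_cases h2 : PySem.Chars.islower d <;>
      simp [h1, h2] at h <;> omega
  exact Char.ext (UInt32.toNat_inj.mp hcd)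

theorem pvKey_le_of_le {c d : Char}
    (hl : PySem.Chars.islower c = PySem.Chars.islower d) (h : c ≤ d) : pvKey c ≤ pvKey d := by
  have : c.toNat ≤ d.toNat := h
  unfold pvKey
  rw [hl]
  omega

theorem pv_partition (l : List Char) (a b : List Char) :
    l.foldl
      (fun (acc : List Char × List Char) char =>
        if PySem.Chars.islower char then (acc.1 ++ [char], acc.2) else (acc.1, acc.2 ++ [char]))
      (a, b)
    = (a ++ l.filter (fun c => PySem.Chars.islower c),
       b ++ l.filter (fun c => !PySem.Chars.islower c)) := by
  induction l generalizing a b with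
  | nil => simp
  | cons x xs ih =>
    by_cases hx : PySem.Chars.islower x <;>
      simp [List.foldl_cons, hx, ih]

theorem pv_main (l : List Char) :
    PySem.List.sorted l pvKey false =
      PySem.List.sorted (l.filter (fun c => PySem.Chars.islower c)) (fun c => c) false ++
      PySem.List.sorted (l.filter (fun c => !PySem.Chars.islower c)) (fun c => c) false := by
  apply PySem.List.eq_of_perm_of_pairwise_le_of_injective pvKey pvKey_inj
  · refine (PySem.List.sorted_perm l pvKey false).trans ?_
    refine ((List.filter_append_perm (fun c => PySem.Chars.islower c) l).symm).trans ?_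
    exact List.Perm.append
      (PySem.List.sorted_perm _ (fun c => c) false).symm
      (PySem.List.sorted_perm _ (fun c => c) false).symm
  · exact PySem.List.sorted_pairwise l pvKey
  · rw [List.pairwise_append]
    refine ⟨?_, ?_, ?_⟩
    · refine (PySem.List.sorted_pairwise _ (fun c => c)).imp_of_mem ?_
      intro c d hc hd h
      have hc' : PySem.Chars.islower c = true := by
        have := (PySem.List.mem_sorted _ _ _ _).mp hc
        exact (List.mem_filter.mp this).2
      have hd' : PySem.Chars.islower d = true := by
        have := (PySem.List.mem_sorted _ _ _ _).mp hd
        exact (List.mem_filter.mp this).2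
      exact pvKey_le_of_le (hc'.trans hd'.symm) h
    · refine (PySem.List.sorted_pairwise _ (fun c => c)).imp_of_mem ?_
      intro c d hc hd h
      have hc' : PySem.Chars.islower c = false := by
        have := (PySem.List.mem_sorted _ _ _ _).mp hc
        simpa using (List.mem_filter.mp this).2
      have hd' : PySem.Chars.islower d = false := by
        have := (PySem.List.mem_sorted _ _ _ _).mp hd
        simpa using (List.mem_filter.mp this).2
      exact pvKey_le_of_le (hc'.trans hd'.symm) h
    · intro c hc d hd
      have hc' : PySem.Chars.islower c = true := by
        have := (PySem.List.mem_sorted _ _ _ _).mp hc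
        exact (List.mem_filter.mp this).2
      have hd' : PySem.Chars.islower d = false := by
        have := (PySem.List.mem_sorted _ _ _ _).mp hd
        simpa using (List.mem_filter.mp this).2
      have h1 := pv_toNat_lt c
      have h2 : (0 : Int) ≤ d.toNat := by positivity
      unfold pvKey
      rw [hc', hd']
      simp
      omega

-- ===== VERDICT (by name: the statement is the Claim_ definition above) =====
theorem arrange_string_spec : Claim_equal_arrange_string := by
  intro s _
  unfold Spec_arrange_string arrange_string arrange_string_alt
  rw [pv_partition]
  simp only [List.nil_append]
  rw [pv_main]
  simp
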